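-- pv_equiv track=rewrite | github.com/KHJun99/Algorithm | SWEA/D4/4530. 극한의 청소 작업/극한의 청소 작업.py | count_4
-- ===== SOURCE A (Python) =====
-- def count_4(n):
--     count = 0
--     length = 0
--     n = abs(n)
--
--     while n > 0:
--         remain = n % 10
--         n = n // 10
--         if remain >= 4:
--             count += (remain - 1) * (9 ** length)
--         else:
--             count += remain * (9 ** length)
--         length += 1
--     return count
-- ===== SOURCE B (Python) =====
-- def count_4(n):
--     n = abs(n)
--     if n <= 0:
--         return 0
--     d = n % 10
--     return count_4(n // 10) * 9 + (d - 1 if d >= 4 else d)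
-- ===== Notes on version B (the rewrite author's own statement) =====
-- stated objective: simpler
-- what changed: Replaces the iterative low-to-high digit loop that tracks a length counter and computes 9**length per digit with a short last-digit-stripping recursion f(n) = f(n//10)*9 + adjusted(n%10), eliminating the count/length accumulators and power computation.
import Mathlib
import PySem

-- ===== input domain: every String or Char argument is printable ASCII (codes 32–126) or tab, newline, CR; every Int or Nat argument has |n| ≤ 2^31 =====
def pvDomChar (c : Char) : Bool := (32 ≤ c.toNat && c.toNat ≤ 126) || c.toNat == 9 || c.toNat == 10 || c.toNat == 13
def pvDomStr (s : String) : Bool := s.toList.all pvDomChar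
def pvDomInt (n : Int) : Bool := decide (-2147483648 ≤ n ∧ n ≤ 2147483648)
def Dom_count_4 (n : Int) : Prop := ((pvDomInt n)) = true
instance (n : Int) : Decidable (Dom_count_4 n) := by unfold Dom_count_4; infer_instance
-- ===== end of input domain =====

-- B replaces A's low-to-high digit loop with explicit 9**length power tracking by a
-- last-digit-stripping recursion f(n) = f(n//10)*9 + adjusted(n%10) (objective: simpler).

-- ===== PORT A =====
-- while-loop of A as structural recursion on the shrinking n; state = (n, count, length).
-- '9 ** length' is ported as '9 ^ length.toNat' — exact, since length starts at 0 and only increases.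
def count4Loop (n count length : Int) : Int :=
  if _h : n > 0 then
    let remain := PySem.Int.mod n 10
    let n' := PySem.Int.floordiv n 10
    if remain ≥ 4 then
      count4Loop n' (count + (remain - 1) * 9 ^ length.toNat) (length + 1)
    else
      count4Loop n' (count + remain * 9 ^ length.toNat) (length + 1)
  else count
termination_by n.toNat
decreasing_by
  all_goals
    simp only [PySem.Int.floordiv_eq_ediv_of_pos (a := n) (by norm_num : (0:Int) < 10)]
    omega

def count_4 (n : Int) : Int := count4Loop |n| 0 0

-- ===== PORT B =====
def count_4_alt (n : Int) : Int :=
  let m := |n|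
  if _h : m ≤ 0 then 0
  else
    let d := PySem.Int.mod m 10
    count_4_alt (PySem.Int.floordiv m 10) * 9 + (if d ≥ 4 then d - 1 else d)
termination_by n.natAbs
decreasing_by
  have h10 : PySem.Int.floordiv |n| 10 = |n| / 10 :=
    PySem.Int.floordiv_eq_ediv_of_pos (by norm_num : (0:Int) < 10)
  simp only [h10]
  have hn : 0 < |n| := by omega
  rw [Int.abs_eq_natAbs] at hn ⊢
  omega

-- ===== PRECONDITION & SPEC =====
def Spec_count_4 (n : Int) (out : Int) : Prop := out = count_4_alt n
instance (n : Int) (out : Int) : Decidable (Spec_count_4 n out) := by unfold Spec_count_4; infer_instance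

-- ===== CLAIM (what is proved, stated in full; the proofs are below) =====
def Claim_equal_count_4 : Prop := ∀ (n : Int), Dom_count_4 n → Spec_count_4 n (count_4 n)

-- ===== LEMMAS AND PROOFS =====
theorem count_4_alt_nonneg_step (m : Int) (hm : 0 < m) :
    count_4_alt m =
      count_4_alt (m / 10) * 9 +
        (if PySem.Int.mod m 10 ≥ 4 then PySem.Int.mod m 10 - 1 else PySem.Int.mod m 10) := by
  rw [count_4_alt.eq_def]
  simp only [abs_of_nonneg (le_of_lt hm),
    PySem.Int.floordiv_eq_ediv_of_pos (a := m) (by norm_num : (0:Int) < 10)]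
  rw [dif_neg (by omega)]

theorem count_4_alt_zero : count_4_alt 0 = 0 := by
  rw [count_4_alt.eq_def]; simp

theorem count4Loop_eq (k : Nat) :
    ∀ (n : Int), n.toNat = k → 0 ≤ n → ∀ (count length : Int), 0 ≤ length →
      count4Loop n count length = count + 9 ^ length.toNat * count_4_alt n := by
  induction k using Nat.strong_induction_on with
  | _ k ih =>
    intro n hk hn count length hl
    rw [count4Loop]
    by_cases hpos : n > 0
    · rw [dif_pos hpos]
      have h10 : PySem.Int.floordiv n 10 = n / 10 :=
        PySem.Int.floordiv_eq_ediv_of_pos (by norm_num : (0:Int) < 10)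
      have hlt : (n / 10).toNat < k := by omega
      have hq : (0:Int) ≤ n / 10 := by positivity
      have hn1 : ((length + 1).toNat : Nat) = length.toNat + 1 := by omega
      have hstep := count_4_alt_nonneg_step n hpos
      set d := PySem.Int.mod n 10 with hd
      by_cases hd4 : d ≥ 4
      · rw [if_pos hd4]
        simp only [h10]
        rw [ih _ hlt _ rfl hq _ _ (by omega), hstep, if_pos hd4, hn1]
        ring
      · rw [if_neg hd4]
        simp only [h10]
        rw [ih _ hlt _ rfl hq _ _ (by omega), hstep, if_neg hd4, hn1]
        ring
    · rw [dif_neg hpos]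
      have hn0 : n = 0 := by omega
      rw [hn0, count_4_alt_zero]
      ring

-- ===== VERDICT (by name: the statement is the Claim_ definition above) =====
theorem count_4_spec : Claim_equal_count_4 := by
  intro n _
  unfold Spec_count_4 count_4
  rw [count4Loop_eq (|n|).toNat |n| rfl (abs_nonneg n) 0 0 le_rfl]
  have : count_4_alt |n| = count_4_alt n := by
    rw [count_4_alt.eq_def, count_4_alt.eq_def, abs_abs]
  simp [this]
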